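-- pv_equiv track=rewrite | github.com/longLiveData/Practice | python/20190409-Chess/reversi.py | enclosing
-- ===== SOURCE A (Python) =====
-- def enclosing(board, player, pos, direct):
--     next = (pos[0]+direct[0], pos[1] +direct[1])
--     r, c = next
--     n = 0
--     while 0 <= r and r < 8 and 0 <= c and c<8:
--         if board[r][c]==player:
--             if n > 0:
--                 return True
--             else:
--                 return False
--         if board[r][c] == 0:
--             return False
--         next = (r+direct[0], c+direct[1])
--         r,c = next
--         n = n + 1
--     return False
-- ===== SOURCE B (Python) =====
-- def enclosing(board, player, pos, direct):
--     # Phase 1: collect the board values along the ray starting one step after pos.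
--     dr, dc = direct
--     r, c = pos[0] + dr, pos[1] + dc
--     ray = []
--     while 0 <= r < 8 and 0 <= c < 8:
--         ray.append(board[r][c])
--         r += dr
--         c += dc
--     # Phase 2: length of the leading run of opponent cells.
--     k = 0
--     for v in ray:
--         if v == player or v == 0:
--             break
--         k += 1
--     return 0 < k < len(ray) and ray[k] == player
-- ===== Notes on version B (the rewrite author's own statement) =====
-- stated objective: alternative
-- what changed: Replaces A's fused walk-and-decide loop (tracking a counter and deciding inside the walk) by two separate phases: first gather the whole ray of board values along the direction, then measure the leading run of opponent cells and test the pattern run>0 and ray[run]==player.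
-- outside the precondition, e.g. on enclosing([[0, 0, 0, 0, 0, 0, 0, 0]], 1, (-1, 0), (1, 0)): A returns False, B raises IndexError
import Mathlib
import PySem

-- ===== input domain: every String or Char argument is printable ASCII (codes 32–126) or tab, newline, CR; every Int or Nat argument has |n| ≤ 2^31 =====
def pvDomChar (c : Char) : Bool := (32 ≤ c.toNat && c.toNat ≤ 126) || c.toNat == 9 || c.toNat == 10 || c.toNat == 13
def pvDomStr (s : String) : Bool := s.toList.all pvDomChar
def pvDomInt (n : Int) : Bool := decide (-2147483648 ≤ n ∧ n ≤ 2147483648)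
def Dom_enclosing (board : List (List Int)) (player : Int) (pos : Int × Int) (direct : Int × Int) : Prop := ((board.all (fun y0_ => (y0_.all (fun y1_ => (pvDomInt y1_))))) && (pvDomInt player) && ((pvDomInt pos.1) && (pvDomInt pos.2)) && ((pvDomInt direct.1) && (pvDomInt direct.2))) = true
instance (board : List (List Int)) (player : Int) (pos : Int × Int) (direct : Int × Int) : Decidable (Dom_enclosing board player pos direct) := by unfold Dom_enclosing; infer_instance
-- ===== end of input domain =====

-- B re-implements A as two phases (gather the ray of cells, then test the leading opponent run);
-- equal return values on Pre_ (A raises / can diverge outside it; B reads the whole ray there).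

-- ===== PORT A =====
-- board[r][c]; Pre_ guarantees both indices are in range, so the defaults are never used.
def pvCell (board : List (List Int)) (r c : Int) : Int :=
  PySem.List.pyGetD (PySem.List.pyGetD board r []) c 0

-- A's while loop. Fuel is a totality device only: inside Pre_ (direct ≠ (0,0)) the loop body
-- runs at most 8 times, so fuel 16 never runs out.
def pvALoop (board : List (List Int)) (player dr dc : Int) : Int → Int → Int → Nat → Bool
  | _, _, _, 0 => false
  | r, c, n, fuel+1 =>
    if 0 ≤ r ∧ r < 8 ∧ 0 ≤ c ∧ c < 8 then
      if pvCell board r c = player then decide (n > 0)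
      else if pvCell board r c = 0 then false
      else pvALoop board player dr dc (r + dr) (c + dc) (n + 1) fuel
    else false

def enclosing (board : List (List Int)) (player : Int) (pos : Int × Int) (direct : Int × Int) : Bool :=
  pvALoop board player direct.1 direct.2 (pos.1 + direct.1) (pos.2 + direct.2) 0 16

-- ===== PORT B =====
-- Phase 1: the list of board values along the ray (same fuel device as A's loop).
def pvRay (board : List (List Int)) (dr dc : Int) : Int → Int → Nat → List Int
  | _, _, 0 => []
  | r, c, fuel+1 =>
    if 0 ≤ r ∧ r < 8 ∧ 0 ≤ c ∧ c < 8 then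
      pvCell board r c :: pvRay board dr dc (r + dr) (c + dc) fuel
    else []

-- Phase 2: length of the leading run of opponent cells (v ≠ player and v ≠ 0).
def pvRunLen (player : Int) : List Int → Nat
  | [] => 0
  | v :: rest => if v = player ∨ v = 0 then 0 else pvRunLen player rest + 1

def enclosing_alt (board : List (List Int)) (player : Int) (pos : Int × Int) (direct : Int × Int) : Bool :=
  let ray := pvRay board direct.1 direct.2 (pos.1 + direct.1) (pos.2 + direct.2) 16
  let k := pvRunLen player ray
  decide (0 < k) && decide (k < ray.length) && decide (ray.getD k 0 = player)

-- ===== PRECONDITION & SPEC =====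
-- Pre_ excludes direct = (0,0), where A can loop forever and B's ray-gathering always diverges,
-- and boards missing a cell at some in-range ray position, where A may raise IndexError and,
-- even where A stops early at a player/empty cell, B still reads the whole ray and raises.
def Pre_enclosing (board : List (List Int)) (player : Int) (pos : Int × Int) (direct : Int × Int) : Prop :=
  (direct.1 ≠ 0 ∨ direct.2 ≠ 0) ∧
  ∀ k ∈ List.range 8,
    let r := pos.1 + (k + 1 : Int) * direct.1
    let c := pos.2 + (k + 1 : Int) * direct.2
    (0 ≤ r ∧ r < 8 ∧ 0 ≤ c ∧ c < 8) →
      (r.toNat < board.length ∧ c.toNat < (board.getD r.toNat []).length)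
instance (board : List (List Int)) (player : Int) (pos : Int × Int) (direct : Int × Int) : Decidable (Pre_enclosing board player pos direct) := by unfold Pre_enclosing; infer_instance

def pvWitness_enclosing : List (List Int) × Int × (Int × Int) × (Int × Int) :=
  ([[0,0,0,0,0,0,0,0],[0,2,0,0,0,0,0,0],[0,0,1,0,0,0,0,0],[0,0,0,0,0,0,0,0],
    [0,0,0,0,0,0,0,0],[0,0,0,0,0,0,0,0],[0,0,0,0,0,0,0,0],[0,0,0,0,0,0,0,0]],
   1, (0, 0), (1, 1))

def Spec_enclosing (board : List (List Int)) (player : Int) (pos : Int × Int) (direct : Int × Int) (out : Bool) : Prop := out = enclosing_alt board player pos direct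
instance (board : List (List Int)) (player : Int) (pos : Int × Int) (direct : Int × Int) (out : Bool) : Decidable (Spec_enclosing board player pos direct out) := by unfold Spec_enclosing; infer_instance

-- ===== CLAIM (what is proved, stated in full; the proofs are below) =====
def Claim_equal_enclosing : Prop := ∀ (board : List (List Int)) (player : Int) (pos : Int × Int) (direct : Int × Int), Dom_enclosing board player pos direct → Pre_enclosing board player pos direct → Spec_enclosing board player pos direct (enclosing board player pos direct)

-- ===== LEMMAS AND PROOFS =====
-- Loop invariant: A's fused loop equals B's two-phase check, generalised over the counter n
-- (which only matters through 0 < n) and over the same fuel on both sides.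
theorem pvALoop_eq_ray (board : List (List Int)) (player dr dc : Int) :
    ∀ (fuel : Nat) (r c n : Int), 0 ≤ n →
      pvALoop board player dr dc r c n fuel =
        (let ray := pvRay board dr dc r c fuel
         let k := pvRunLen player ray
         (decide (0 < k ∨ 0 < n) && decide (k < ray.length) && decide (ray.getD k 0 = player))) := by
  intro fuel
  induction fuel with
  | zero => intro r c n _; simp [pvALoop, pvRay, pvRunLen]
  | succ f ih =>
    intro r c n hn
    simp only [pvALoop, pvRay]
    split_ifs with hin hp h0
    · -- cell = player: run stops at 0, ray[0] = player
      simp [pvRunLen, hp]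
    · -- cell = 0 (≠ player): run stops at 0, ray[0] = 0 ≠ player
      simp [pvRunLen, h0]
      exact fun _ h => hp (by rw [h0, ← h])
    · -- opponent cell: one more run step, recurse
      rw [ih (r + dr) (c + dc) (n + 1) (by omega)]
      simp [pvRunLen, hp, h0, hn]
    · simp [pvRunLen]


theorem enclosing_eq_alt (board : List (List Int)) (player : Int) (pos : Int × Int) (direct : Int × Int) :
    enclosing board player pos direct = enclosing_alt board player pos direct := by
  unfold enclosing enclosing_alt
  rw [pvALoop_eq_ray board player direct.1 direct.2 16 (pos.1 + direct.1) (pos.2 + direct.2) 0 le_rfl]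
  simp

-- ===== VERDICT (by name: the statement is the Claim_ definition above) =====
theorem enclosing_spec : Claim_equal_enclosing := by
  intro board player pos direct _ _
  exact enclosing_eq_alt board player pos direct
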